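-- pv_equiv track=rewrite | github.com/itisamazingxx/oa | amazon/ProcessExecution.py | processExecution
-- ===== SOURCE A (Python) =====
-- def processExecution(power, minPower, maxPower):
--     n = len(power) # 线程数
--     m = len(minPower) # 处理器数量
--     ans = []
--     # 遍历每一个处理器, 看其能处理的线程情况
--     for i in range(m):
--         count = 0
--         result = 0
--         for j in range(n):
--             if minPower[i] <= power[j] <= maxPower[i]:
--                 count += 1
--                 result += power[j]
--         ans.append([count, result])
--     return ans
-- ===== SOURCE B (Python) =====
-- def _bisect_left(s, t):
--     lo, hi = 0, len(s)
--     while lo < hi: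
--         mid = (lo + hi) // 2
--         if s[mid] < t:
--             lo = mid + 1
--         else:
--             hi = mid
--     return lo
--
-- def _bisect_right(s, t):
--     lo, hi = 0, len(s)
--     while lo < hi:
--         mid = (lo + hi) // 2
--         if s[mid] <= t:
--             lo = mid + 1
--         else:
--             hi = mid
--     return lo
--
-- def processExecution(power, minPower, maxPower):
--     s = sorted(power)
--     pref = [0]
--     t = 0
--     for x in s:
--         t += x
--         pref.append(t)
--     ans = []
--     for lo, hi in zip(minPower, maxPower):
--         l = _bisect_left(s, lo)
--         r = _bisect_right(s, hi)
--         if l < r: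
--             ans.append([r - l, pref[r] - pref[l]])
--         else:
--             ans.append([0, 0])
--     return ans
-- ===== Notes on version B (the rewrite author's own statement) =====
-- stated objective: faster
-- what changed: Replaces A's per-processor linear scan of all threads by sorting power once, building prefix sums, and answering each [min,max] query with two hand-written binary searches.
-- outside the precondition, e.g. on processExecution([], [0], []): A returns [[0, 0]], B returns []; on processExecution([1], [0, 0], [5]): A raises IndexError, B returns [[1, 1]]
import Mathlib
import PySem

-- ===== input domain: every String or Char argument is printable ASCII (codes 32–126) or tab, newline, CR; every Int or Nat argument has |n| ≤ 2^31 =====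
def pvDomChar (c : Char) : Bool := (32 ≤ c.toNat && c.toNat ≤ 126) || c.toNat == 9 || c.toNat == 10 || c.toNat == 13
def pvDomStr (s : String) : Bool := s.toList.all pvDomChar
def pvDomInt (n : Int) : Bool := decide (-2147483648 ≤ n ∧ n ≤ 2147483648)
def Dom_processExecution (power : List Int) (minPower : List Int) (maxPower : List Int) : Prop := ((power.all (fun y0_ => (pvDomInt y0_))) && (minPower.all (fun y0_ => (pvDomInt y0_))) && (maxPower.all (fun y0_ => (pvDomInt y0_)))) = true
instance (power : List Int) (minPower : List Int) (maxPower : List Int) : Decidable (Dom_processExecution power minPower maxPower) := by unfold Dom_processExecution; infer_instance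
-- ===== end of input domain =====

-- B replaces A's per-processor scan of all threads (O(m·n)) by sort + prefix sums + binary search per query (O((n+m)·log n)).

-- ===== PORT A =====
-- literal port of A: for each i in range(len(minPower)), scan all of power, counting and summing threads in range
def processExecution (power : List Int) (minPower : List Int) (maxPower : List Int) : List (List Int) :=
  let n : Int := PySem.List.len power
  let m : Int := PySem.List.len minPower
  (PySem.List.pyRange 0 m 1).foldl (fun ans i =>
    let cr := (PySem.List.pyRange 0 n 1).foldl (fun cr j =>
      if PySem.List.pyGetD minPower i 0 ≤ PySem.List.pyGetD power j 0 ∧ PySem.List.pyGetD power j 0 ≤ PySem.List.pyGetD maxPower i 0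
      then (cr.1 + 1, cr.2 + PySem.List.pyGetD power j 0) else cr) ((0 : Int), (0 : Int))
    ans ++ [[cr.1, cr.2]]) []

-- ===== PORT B =====
-- the running-total loop 'for x in s: t += x; pref.append(t)' of Source B
def buildPref (t : Int) : List Int → List Int
  | [] => []
  | x :: xs => (t + x) :: buildPref (t + x) xs

-- Source B's hand-written _bisect_left/_bisect_right are exactly the standard binary-search loops,
-- ported as the prelude's own PySem.List.bisectLeft / bisectRight (same algorithm).
-- pref[l] / pref[r] are in range (l ≤ r ≤ len s < len pref), so getD 0 is exact.
def processExecution_alt (power : List Int) (minPower : List Int) (maxPower : List Int) : List (List Int) :=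
  let s := PySem.List.sorted power (fun x => x) false
  let pref := 0 :: buildPref 0 s
  (minPower.zip maxPower).map (fun q =>
    let l := PySem.List.bisectLeft s q.1
    let r := PySem.List.bisectRight s q.2
    if l < r then [(r : Int) - (l : Int), pref.getD r 0 - pref.getD l 0] else [0, 0])

-- ===== PRECONDITION & SPEC =====
-- Pre_ excludes mismatched query lists (len(maxPower) < len(minPower)): there A raises IndexError unless chained-comparison short-circuit skips every out-of-range maxPower[i], in which case its value is accidental; B's zip truncates to the paired queries.
def Pre_processExecution (power : List Int) (minPower : List Int) (maxPower : List Int) : Prop :=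
  minPower.length ≤ maxPower.length
instance (power : List Int) (minPower : List Int) (maxPower : List Int) : Decidable (Pre_processExecution power minPower maxPower) := by unfold Pre_processExecution; infer_instance

def pvWitness_processExecution : List Int × List Int × List Int := ([3, 1, 4, 1, 5], [1, 2, 6], [4, 5, 9])

def Spec_processExecution (power : List Int) (minPower : List Int) (maxPower : List Int) (out : List (List Int)) : Prop := out = processExecution_alt power minPower maxPower
instance (power : List Int) (minPower : List Int) (maxPower : List Int) (out : List (List Int)) : Decidable (Spec_processExecution power minPower maxPower out) := by unfold Spec_processExecution; infer_instance

-- ===== CLAIM (what is proved, stated in full; the proofs are below) =====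
def Claim_equal_processExecution : Prop := ∀ (power : List Int) (minPower : List Int) (maxPower : List Int), Dom_processExecution power minPower maxPower → Pre_processExecution power minPower maxPower → Spec_processExecution power minPower maxPower (processExecution power minPower maxPower)

-- ===== LEMMAS AND PROOFS =====

-- a predicate that is false below index l, true on [l, r) and false from r on filters to the middle segment
theorem filter_eq_seg (s : List Int) (p : Int → Bool) (l r : Nat) (hlr : l ≤ r) (hr : r ≤ s.length)
    (hbelow : ∀ (j : Nat) (hj : j < s.length), j < l → p s[j] = false)
    (hmid : ∀ (j : Nat) (hj : j < s.length), l ≤ j → j < r → p s[j] = true)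
    (habove : ∀ (j : Nat) (hj : j < s.length), r ≤ j → p s[j] = false) :
    s.filter p = (s.take r).drop l := by
  have hsplit : s = s.take r ++ s.drop r := (List.take_append_drop r s).symm
  have hdrop : (s.drop r).filter p = [] := by
    rw [List.filter_eq_nil_iff]
    intro x hx
    obtain ⟨i, hi, hx⟩ := List.mem_iff_getElem.mp hx
    have : (s.drop r)[i] = s[r + i]'(by simp at hi; omega) := by
      simp [List.getElem_drop]
    rw [this] at hx
    simp only [← hx, habove (r + i) (by simp at hi; omega) (by omega)]
    simp
  have htake2 : (s.take r).take l = s.take l := by rw [List.take_take, min_eq_left hlr]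
  have hsplit2 : s.take r = s.take l ++ (s.take r).drop l := by
    conv_lhs => rw [← List.take_append_drop l (s.take r)]
    rw [htake2]
  have hlen : ∀ x, x ∈ s.take l → p x = false := by
    intro x hx
    obtain ⟨i, hi, hx⟩ := List.mem_iff_getElem.mp hx
    have hil : i < l := by simp at hi; omega
    have : (s.take l)[i]'hi = s[i]'(by simp at hi; omega) := List.getElem_take ..
    rw [this] at hx
    simp only [← hx, hbelow i (by simp at hi; omega) hil]
  have hmidall : ∀ x, x ∈ (s.take r).drop l → p x = true := by
    intro x hx
    obtain ⟨i, hi, hx⟩ := List.mem_iff_getElem.mp hx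
    have h1 : ((s.take r).drop l)[i] = (s.take r)[l + i]'(by simp at hi ⊢; omega) := by
      simp [List.getElem_drop]
    have h2 : (s.take r)[l + i]'(by simp at hi ⊢; omega) = s[l + i]'(by simp at hi ⊢; omega) :=
      List.getElem_take ..
    rw [h1, h2] at hx
    have hi' : l + i < r := by simp at hi; omega
    rw [← hx]
    exact hmid (l + i) (by omega) (by omega) hi'
  conv_lhs => rw [hsplit]
  rw [List.filter_append, hdrop, List.append_nil]
  conv_lhs => rw [hsplit2]
  rw [List.filter_append, List.filter_eq_nil_iff.mpr (fun x hx => by simp [hlen x hx]),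
    List.filter_eq_self.mpr hmidall, List.nil_append]

-- prefix-sum list: (0 :: buildPref 0 s)[k] is the sum of the first k elements
theorem buildPref_getD (s : List Int) : ∀ (t : Int) (k : Nat), k < s.length →
    (buildPref t s).getD k 0 = t + (s.take (k + 1)).sum := by
  induction s with
  | nil => intro t k hk; simp at hk
  | cons x xs ih =>
    intro t k hk
    cases k with
    | zero => simp [buildPref]
    | succ j =>
      simp only [buildPref, List.getD_cons_succ, List.take_succ_cons, List.sum_cons]
      rw [ih (t + x) j (by simpa using hk)]
      ring

theorem pref_getD (s : List Int) (k : Nat) (hk : k ≤ s.length) :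
    (0 :: buildPref 0 s).getD k 0 = (s.take k).sum := by
  cases k with
  | zero => simp
  | succ j =>
    have hj : j < s.length := by omega
    rw [List.getD_cons_succ, buildPref_getD s 0 j hj]
    simp

-- per-query: count and sum of in-range elements, computed by B's bisect + prefix sums
theorem query_eq (s : List Int) (hs : s.Pairwise (· ≤ ·)) (lo hi : Int) :
    ([((s.filter (fun x => decide (lo ≤ x ∧ x ≤ hi))).length : Int),
      (s.filter (fun x => decide (lo ≤ x ∧ x ≤ hi))).sum] : List Int)
    = (if PySem.List.bisectLeft s lo < PySem.List.bisectRight s hi then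
        [((PySem.List.bisectRight s hi : Int)) - ((PySem.List.bisectLeft s lo : Int)),
         (0 :: buildPref 0 s).getD (PySem.List.bisectRight s hi) 0 - (0 :: buildPref 0 s).getD (PySem.List.bisectLeft s lo) 0]
       else [0, 0]) := by
  set l := PySem.List.bisectLeft s lo with hl
  set r := PySem.List.bisectRight s hi with hrdef
  obtain ⟨hlle, hlbelow, hlabove⟩ := PySem.List.bisectLeft_spec s lo hs
  obtain ⟨hrle, hrbelow, hrabove⟩ := PySem.List.bisectRight_spec s hi hs
  by_cases hcase : l < r
  · rw [if_pos hcase]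
    have hfil : s.filter (fun x => decide (lo ≤ x ∧ x ≤ hi)) = (s.take r).drop l := by
      apply filter_eq_seg s _ l r (le_of_lt hcase) hrle
      · intro j hj hjl
        have := hlbelow j hj hjl
        simp; omega
      · intro j hj hjl hjr
        have h1 := hlabove j hj hjl
        have h2 := hrbelow j hj hjr
        simp; omega
      · intro j hj hjr
        have := hrabove j hj hjr
        simp; omega
    have hsplit2 : s.take r = s.take l ++ (s.take r).drop l := by
      conv_lhs => rw [← List.take_append_drop l (s.take r)]
      rw [List.take_take, min_eq_left (le_of_lt hcase)]
    have hlenfil : ((s.take r).drop l).length = r - l := by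
      simp [List.length_drop, List.length_take]; omega
    have hsum : ((s.take r).drop l).sum = (s.take r).sum - (s.take l).sum := by
      have := congrArg List.sum hsplit2
      rw [List.sum_append] at this
      omega
    rw [hfil, hlenfil, hsum, pref_getD s r hrle, pref_getD s l (by omega)]
    congr 1
    omega
  · rw [if_neg hcase]
    have hfil : s.filter (fun x => decide (lo ≤ x ∧ x ≤ hi)) = [] := by
      rw [List.filter_eq_nil_iff]
      intro x hx
      obtain ⟨j, hj, hx⟩ := List.mem_iff_getElem.mp hx
      subst hx
      by_cases hjl : j < l
      · have := hlbelow j hj hjl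
        simp; omega
      · have := hrabove j hj (by omega)
        simp; omega
    rw [hfil]
    simp

-- A's inner loop over indices is count/sum of the filtered list
theorem innerA (power : List Int) (lo hi : Int) :
    (PySem.List.pyRange 0 (PySem.List.len power) 1).foldl (fun cr j =>
      if lo ≤ PySem.List.pyGetD power j 0 ∧ PySem.List.pyGetD power j 0 ≤ hi
      then (cr.1 + 1, cr.2 + PySem.List.pyGetD power j 0) else cr) ((0 : Int), (0 : Int))
    = (((power.filter (fun x => decide (lo ≤ x ∧ x ≤ hi))).length : Int),
       (power.filter (fun x => decide (lo ≤ x ∧ x ≤ hi))).sum) := by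
  rw [PySem.List.foldl_pyRange_zero_pyGetD power 0
    (fun cr x => if lo ≤ x ∧ x ≤ hi then (cr.1 + 1, cr.2 + x) else cr) ((0:Int), (0:Int))]
  rw [PySem.List.foldl_ite_eq_foldl_filter]
  rw [PySem.List.foldl_prod_mk (f := fun a (_ : Int) => a + 1) (g := fun a x => a + x)]
  refine Prod.ext ?_ ?_
  · show List.foldl (fun a (_ : Int) => a + 1) 0 _ = _
    rw [PySem.List.foldl_add (g := fun _ => (1 : Int))]
    simp [mul_comm]
  · show List.foldl (fun a x => a + x) 0 _ = _
    rw [PySem.List.foldl_add (g := fun x => x)]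
    simp

-- indexing the pair of query lists is mapping over their zip
theorem map_range_eq_zip_map (minPower maxPower : List Int) (h : minPower.length ≤ maxPower.length)
    (G : Int → Int → List Int) :
    (PySem.List.pyRange 0 (PySem.List.len minPower) 1).map
      (fun i => G (PySem.List.pyGetD minPower i 0) (PySem.List.pyGetD maxPower i 0))
    = (minPower.zip maxPower).map (fun q => G q.1 q.2) := by
  apply List.ext_getElem
  · simp [PySem.List.length_pyRange_one, PySem.List.len]; omega
  · intro k h1 h2
    have hk : k < minPower.length := by
      simpa [PySem.List.length_pyRange_one, PySem.List.len] using h1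
    have hk2 : k < maxPower.length := by omega
    have hrk : (PySem.List.pyRange 0 (PySem.List.len minPower) 1)[k]'(by
        simpa [PySem.List.length_pyRange_one, PySem.List.len] using hk) = (k : Int) := by
      rw [PySem.List.getElem_pyRange_one]; simp
    simp only [List.getElem_map, hrk, List.getElem_zip]
    rw [PySem.List.pyGetD_natCast, PySem.List.pyGetD_natCast,
      List.getD_eq_getElem _ _ hk, List.getD_eq_getElem _ _ hk2]

-- ===== VERDICT (by name: the statement is the Claim_ definition above) =====
theorem processExecution_spec : Claim_equal_processExecution := by
  intro power minPower maxPower _hdom hpre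
  unfold Spec_processExecution processExecution processExecution_alt
  simp only []
  rw [PySem.List.foldl_append_singleton_eq_map]
  simp only [innerA]
  rw [List.nil_append,
    map_range_eq_zip_map minPower maxPower hpre
      (G := fun lo hi => [((power.filter (fun x => decide (lo ≤ x ∧ x ≤ hi))).length : Int),
        (power.filter (fun x => decide (lo ≤ x ∧ x ≤ hi))).sum])]
  apply List.map_congr_left
  intro q _hq
  have hpw : (PySem.List.sorted power (fun x => x) false).Pairwise (· ≤ ·) := by
    simpa using PySem.List.sorted_pairwise power (fun x => x)
  have hperm : (PySem.List.sorted power (fun x => x) false).Perm power :=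
    PySem.List.sorted_perm power (fun x => x) false
  have hq := query_eq (PySem.List.sorted power (fun x => x) false) hpw q.1 q.2
  have hlen : (power.filter (fun x => decide (q.1 ≤ x ∧ x ≤ q.2))).length
      = ((PySem.List.sorted power (fun x => x) false).filter (fun x => decide (q.1 ≤ x ∧ x ≤ q.2))).length :=
    ((hperm.filter _).length_eq).symm
  have hsum : (power.filter (fun x => decide (q.1 ≤ x ∧ x ≤ q.2))).sum
      = ((PySem.List.sorted power (fun x => x) false).filter (fun x => decide (q.1 ≤ x ∧ x ≤ q.2))).sum :=
    ((hperm.filter _).sum_eq).symm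
  rw [hlen, hsum, hq]
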